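-- pv_equiv track=rewrite | github.com/btbest/blockwise-ilastik-multicut | multicut_from_ilp.py | _find_boundary_channel
-- ===== SOURCE A (Python) =====
-- def _find_boundary_channel(feature_names: dict) -> str:
--     """
--     Identify the boundary/probability channel from the .ilp FeatureNames dict.
--
--     Looks for a channel whose name contains 'boundary', 'wsdt', 'probabilit',
--     or 'membrane' (case-insensitive).  Falls back to the first channel that
--     does not contain 'raw', then to the first channel overall.
--
--     This is needed because the watershed must run on the boundary probability
--     map, not on raw intensity — and the dict insertion order cannot be relied
--     upon to place the boundary channel first.
--     """
--     for name in feature_names: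
--         lower = name.lower()
--         if any(kw in lower for kw in ("boundary", "wsdt", "probabilit", "membrane")):
--             return name
--     for name in feature_names:
--         if "raw" not in name.lower():
--             return name
--     return next(iter(feature_names))
-- ===== SOURCE B (Python) =====
-- def _find_boundary_channel(feature_names: dict) -> str:
--     # Single pass: return on first keyword hit; meanwhile record first non-'raw'
--     # name and first name overall, used as fallbacks after the loop.
--     candidate = None
--     first = None
--     for name in feature_names:
--         lower = name.lower()
--         if any(kw in lower for kw in ("boundary", "wsdt", "probabilit", "membrane")):
--             return name
--         if first is None:
--             first = name
--         if candidate is None and "raw" not in lower: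
--             candidate = name
--     if candidate is not None:
--         return candidate
--     if first is not None:
--         return first
--     return next(iter(feature_names))
-- ===== Notes on version B (the rewrite author's own statement) =====
-- stated objective: alternative
-- what changed: Replaces A's two sequential scans over the keys by a single pass that returns on a keyword hit and otherwise records the first non-'raw' name and the first name as fallbacks.
import Mathlib
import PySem

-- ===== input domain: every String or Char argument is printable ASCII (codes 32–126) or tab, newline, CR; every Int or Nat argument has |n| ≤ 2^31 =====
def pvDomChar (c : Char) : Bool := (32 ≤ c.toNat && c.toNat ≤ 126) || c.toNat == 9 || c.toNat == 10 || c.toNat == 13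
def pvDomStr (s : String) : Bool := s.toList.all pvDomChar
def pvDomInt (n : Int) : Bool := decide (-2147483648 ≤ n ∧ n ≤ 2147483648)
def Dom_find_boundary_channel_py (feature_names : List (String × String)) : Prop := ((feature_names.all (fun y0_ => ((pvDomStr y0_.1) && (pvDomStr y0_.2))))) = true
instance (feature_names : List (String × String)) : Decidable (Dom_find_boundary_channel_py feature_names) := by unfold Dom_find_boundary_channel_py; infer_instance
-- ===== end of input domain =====

-- B replaces A's two sequential scans by a single pass recording the fallbacks; same O(n) cost.

-- ===== PORT A =====
-- any(kw in lower for kw in ("boundary", "wsdt", "probabilit", "membrane"))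
def pvHasKw (lower : String) : Bool :=
  PySem.Str.isIn "boundary" lower || PySem.Str.isIn "wsdt" lower ||
  PySem.Str.isIn "probabilit" lower || PySem.Str.isIn "membrane" lower

-- first loop of A: first name whose lowercase contains a keyword
def pvALoop1 : List (String × String) → Option String
  | [] => none
  | (n, _) :: t => if pvHasKw (PySem.Str.lower n) then some n else pvALoop1 t

-- second loop of A: first name whose lowercase does not contain 'raw'
def pvALoop2 : List (String × String) → Option String
  | [] => none
  | (n, _) :: t => if ¬ (PySem.Str.isIn "raw" (PySem.Str.lower n)) then some n else pvALoop2 t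

def find_boundary_channel_py (feature_names : List (String × String)) : String :=
  match pvALoop1 feature_names with
  | some n => n
  | none =>
    match pvALoop2 feature_names with
    | some n => n
    | none =>
      -- next(iter(feature_names)): raises StopIteration on the empty dict (excluded by Pre_)
      match feature_names with
      | (n, _) :: _ => n
      | [] => ""

-- ===== PORT B =====
-- single pass carrying the two fallback accumulators (candidate, first)
def pvBLoop : List (String × String) → Option String → Option String → String
  | [], cand, first =>
    match cand with
    | some c => c
    | none =>
      match first with
      | some f => f
      | none => ""   -- next(iter(...)) on the empty dict: StopIteration, excluded by Pre_
  | (n, _) :: t, cand, first =>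
    let lower := PySem.Str.lower n
    if pvHasKw lower then n
    else
      pvBLoop t
        (if cand.isNone && ¬ (PySem.Str.isIn "raw" lower) then some n else cand)
        (if first.isNone then some n else first)

def find_boundary_channel_py_alt (feature_names : List (String × String)) : String :=
  pvBLoop feature_names none none

-- ===== PRECONDITION & SPEC =====
-- Pre_ excludes only the empty dict, on which Python A raises StopIteration.
def Pre_find_boundary_channel_py (feature_names : List (String × String)) : Prop := feature_names ≠ []
instance (feature_names : List (String × String)) : Decidable (Pre_find_boundary_channel_py feature_names) := by unfold Pre_find_boundary_channel_py; infer_instance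
def pvWitness_find_boundary_channel_py : (List (String × String)) := [("Raw Data", "0"), ("Boundaries", "1")]

def Spec_find_boundary_channel_py (feature_names : List (String × String)) (out : String) : Prop := out = find_boundary_channel_py_alt feature_names
instance (feature_names : List (String × String)) (out : String) : Decidable (Spec_find_boundary_channel_py feature_names out) := by unfold Spec_find_boundary_channel_py; infer_instance

-- ===== CLAIM (what is proved, stated in full; the proofs are below) =====
def Claim_equal_find_boundary_channel_py : Prop := ∀ (feature_names : List (String × String)), Dom_find_boundary_channel_py feature_names → Pre_find_boundary_channel_py feature_names → Spec_find_boundary_channel_py feature_names (find_boundary_channel_py feature_names)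

-- ===== LEMMAS AND PROOFS =====

-- Invariant of B's single pass, in terms of A's two scans and the accumulators.
theorem pvBLoop_eq (t : List (String × String)) :
    ∀ (cand first : Option String),
      pvBLoop t cand first =
        match pvALoop1 t with
        | some n => n
        | none =>
          match cand with
          | some c => c
          | none =>
            match pvALoop2 t with
            | some n => n
            | none =>
              match first with
              | some f => f
              | none =>
                match t with
                | (n, _) :: _ => n
                | [] => "" := by
  induction t with
  | nil =>
    intro cand first
    cases cand <;> cases first <;> simp [pvBLoop, pvALoop1, pvALoop2]
  | cons h t ih =>
    intro cand first
    obtain ⟨n, v⟩ := h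
    by_cases hkw : pvHasKw (PySem.Str.lower n)
    · simp [pvBLoop, pvALoop1, hkw]
    · simp only [pvBLoop, pvALoop1, pvALoop2, hkw]
      rw [ih]
      cases hl1 : pvALoop1 t with
      | some m => simp
      | none =>
        simp only
        cases cand with
        | some c => simp
        | none =>
          by_cases hraw : PySem.Chars.isIn ['r','a','w'] (PySem.Chars.lower n.toList) = false
          · simp [hraw]
          · rw [Bool.not_eq_false] at hraw
            cases hl2 : pvALoop2 t <;> cases first <;> simp [hraw]

-- ===== VERDICT (by name: the statement is the Claim_ definition above) =====
theorem find_boundary_channel_py_spec : Claim_equal_find_boundary_channel_py := by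
  intro fns _ _
  unfold Spec_find_boundary_channel_py find_boundary_channel_py find_boundary_channel_py_alt
  rw [pvBLoop_eq]
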